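-- pv_equiv track=rewrite | github.com/ali0jn/Smart-Advisor | flaskr/scrapers/timetable_scraper.py | get_event_detail
-- ===== SOURCE A (Python) =====
-- def get_event_detail(days, time_slots, location):
--     details = []
--     if location == []:
--         return None
--
--     if len(days) == len(time_slots):
--         if len(days) == len(location):
--             for i in range(len(days)):
--                 details.append([days[i], time_slots[i], location[i]])
--             return details
--         else:
--             for i in range(len(days)):
--                 details.append([days[i], time_slots[i], location[0]])
--             return details
--
--     elif len(days) > len(time_slots):
--         if len(days) == len(location):
--             for i in range(len(days)):
--                 details.append([days[i], time_slots[0], location[i]])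
--             return details
--         else:
--             for i in range(len(days)):
--                 details.append([days[i], time_slots[0], location[0]])
--             return details
--
--     elif len(days) < len(time_slots):
--         if len(time_slots) == len(location):
--             for i in range(len(time_slots)):
--                 details.append([days[0], time_slots[i], location[i]])
--             return details
--         else:
--             for i in range(len(time_slots)):
--                 details.append([days[0], time_slots[i], location[0]])
--             return details
-- ===== SOURCE B (Python) =====
-- def get_event_detail(days, time_slots, location):
--     if location == []:
--         return None
--     n = max(len(days), len(time_slots))
--
--     def stretch(xs):
--         return xs if len(xs) == n else [xs[0]] * n
--
--     return [list(t) for t in zip(stretch(days), stretch(time_slots), stretch(location))]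
-- ===== Notes on version B (the rewrite author's own statement) =====
-- stated objective: simpler
-- what changed: Instead of six length-comparison branches each running its own indexed append loop, B materializes three staged lists of length n = max(len(days), len(time_slots)) (a list is kept if it already has length n, otherwise its head is replicated n times) and then zips the three lists into rows, with no per-element index arithmetic or branching.
import Mathlib
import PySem

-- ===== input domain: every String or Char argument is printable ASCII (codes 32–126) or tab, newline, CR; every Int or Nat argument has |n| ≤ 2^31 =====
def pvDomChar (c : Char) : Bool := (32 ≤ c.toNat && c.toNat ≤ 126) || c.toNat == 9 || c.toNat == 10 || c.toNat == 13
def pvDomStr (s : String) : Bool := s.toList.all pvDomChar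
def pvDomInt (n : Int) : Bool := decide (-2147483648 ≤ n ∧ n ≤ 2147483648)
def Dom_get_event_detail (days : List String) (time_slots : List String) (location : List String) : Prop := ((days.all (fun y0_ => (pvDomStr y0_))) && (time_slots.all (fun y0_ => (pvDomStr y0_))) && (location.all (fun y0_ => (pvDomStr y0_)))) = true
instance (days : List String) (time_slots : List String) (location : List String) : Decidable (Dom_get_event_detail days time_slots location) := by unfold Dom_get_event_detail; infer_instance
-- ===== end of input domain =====

-- B replaces A's six length-comparison branches and indexed loops by a replicate-then-zip
-- pipeline (stretch each list to n = max of the driver lengths, then zip); objective: simpler.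

-- ===== PORT A =====
def get_event_detail (days : List String) (time_slots : List String) (location : List String) : Option (List (List String)) :=
  if location = [] then none
  else if days.length = time_slots.length then
    if days.length = location.length then
      some ((PySem.List.pyRange 0 days.length 1).foldl
        (fun details i => details ++ [[PySem.List.pyGetD days i "", PySem.List.pyGetD time_slots i "", PySem.List.pyGetD location i ""]]) [])
    else
      some ((PySem.List.pyRange 0 days.length 1).foldl
        (fun details i => details ++ [[PySem.List.pyGetD days i "", PySem.List.pyGetD time_slots i "", PySem.List.pyGetD location 0 ""]]) [])
  else if days.length > time_slots.length then
    if days.length = location.length then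
      some ((PySem.List.pyRange 0 days.length 1).foldl
        (fun details i => details ++ [[PySem.List.pyGetD days i "", PySem.List.pyGetD time_slots 0 "", PySem.List.pyGetD location i ""]]) [])
    else
      some ((PySem.List.pyRange 0 days.length 1).foldl
        (fun details i => details ++ [[PySem.List.pyGetD days i "", PySem.List.pyGetD time_slots 0 "", PySem.List.pyGetD location 0 ""]]) [])
  else if days.length < time_slots.length then
    if time_slots.length = location.length then
      some ((PySem.List.pyRange 0 time_slots.length 1).foldl
        (fun details i => details ++ [[PySem.List.pyGetD days 0 "", PySem.List.pyGetD time_slots i "", PySem.List.pyGetD location i ""]]) [])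
    else
      some ((PySem.List.pyRange 0 time_slots.length 1).foldl
        (fun details i => details ++ [[PySem.List.pyGetD days 0 "", PySem.List.pyGetD time_slots i "", PySem.List.pyGetD location 0 ""]]) [])
  else none  -- unreachable fall-through of the Python elif chain

-- ===== PORT B =====
-- stretch(xs): xs when len(xs) == n, else [xs[0]] * n
def pvStretch (n : Nat) (xs : List String) : List String :=
  if xs.length = n then xs else List.replicate n (PySem.List.pyGetD xs 0 "")

def get_event_detail_alt (days : List String) (time_slots : List String) (location : List String) : Option (List (List String)) :=
  if location = [] then none
  else
    let n := max days.length time_slots.length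
    some (((pvStretch n days).zip ((pvStretch n time_slots).zip (pvStretch n location))).map
      (fun x => [x.1, x.2.1, x.2.2]))

-- ===== PRECONDITION & SPEC =====
-- Pre_ excludes exactly the inputs on which Python A raises IndexError: location nonempty
-- and exactly one of days/time_slots empty (then days[0] or time_slots[0] is accessed).
def Pre_get_event_detail (days : List String) (time_slots : List String) (location : List String) : Prop :=
  location = [] ∨ (days = [] ↔ time_slots = [])
instance (days : List String) (time_slots : List String) (location : List String) : Decidable (Pre_get_event_detail days time_slots location) := by unfold Pre_get_event_detail; infer_instance

def pvWitness_get_event_detail : List String × List String × List String := (["Mon", "Tue"], ["10:00", "11:00"], ["Hall"])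

def Spec_get_event_detail (days : List String) (time_slots : List String) (location : List String) (out : Option (List (List String))) : Prop := out = get_event_detail_alt days time_slots location
instance (days : List String) (time_slots : List String) (location : List String) (out : Option (List (List String))) : Decidable (Spec_get_event_detail days time_slots location out) := by unfold Spec_get_event_detail; infer_instance

-- ===== CLAIM (what is proved, stated in full; the proofs are below) =====
def Claim_equal_get_event_detail : Prop := ∀ (days : List String) (time_slots : List String) (location : List String), Dom_get_event_detail days time_slots location → Pre_get_event_detail days time_slots location → Spec_get_event_detail days time_slots location (get_event_detail days time_slots location)

-- ===== LEMMAS AND PROOFS =====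

-- zip of three length-n lists, mapped to rows, equals the indexed comprehension over range n
theorem pv_zip3_eq_range (a b c : List String) (n : Nat)
    (ha : a.length = n) (hb : b.length = n) (hc : c.length = n) :
    ((a.zip (b.zip c)).map (fun x => [x.1, x.2.1, x.2.2])) =
      (PySem.List.pyRange 0 n 1).map
        (fun i => [PySem.List.pyGetD a i "", PySem.List.pyGetD b i "", PySem.List.pyGetD c i ""]) := by
  apply List.ext_getElem
  · simp [ha, hb, hc, PySem.List.length_pyRange_one]
  · intro k h1 h2
    have hk : k < n := by simpa [ha, hb, hc] using h1
    simp only [List.getElem_map, List.getElem_zip, PySem.List.getElem_pyRange_one]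
    have : (0 : Int) + k = (k : Int) := by omega
    rw [this]
    simp [PySem.List.pyGetD_natCast, List.getD, ha, hb, hc, hk]

theorem pv_foldl_map (l : List Int) (f : Int → List String) :
    l.foldl (fun details i => details ++ [f i]) [] = l.map f := by
  simpa using PySem.List.foldl_append_singleton_eq_map f l []

-- pyGetD on a replicate, inside the range, is the replicated value
theorem pv_getD_replicate (n : Nat) (v : String) (i : Int) (h0 : 0 ≤ i) (h : i < (n : Int)) :
    PySem.List.pyGetD (List.replicate n v) i "" = v := by
  obtain ⟨k, rfl⟩ := Int.eq_ofNat_of_zero_le h0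
  have hk : k < n := by exact_mod_cast h
  rw [PySem.List.pyGetD_natCast]
  simp [List.getD, hk]

theorem get_event_detail_spec : Claim_equal_get_event_detail := by
  intro days time_slots location _ hp
  unfold Spec_get_event_detail get_event_detail get_event_detail_alt
  by_cases hl : location = []
  · simp [hl]
  · simp only [if_neg hl]
    rcases hp with hp | hp
    · exact absurd hp hl
    rcases lt_trichotomy days.length time_slots.length with h | h | h
    · -- days < time_slots
      have hn : max days.length time_slots.length = time_slots.length := by omega
      rw [if_neg (by omega), if_neg (by omega), if_pos h, hn]
      by_cases h2 : time_slots.length = location.length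
      · rw [if_pos h2, pv_foldl_map]
        refine congrArg some ?_
        unfold pvStretch
        rw [if_neg (by omega), if_pos rfl, if_pos h2.symm]
        rw [pv_zip3_eq_range _ _ _ time_slots.length (by simp) rfl h2.symm]
        refine List.map_congr_left ?_
        intro i hi
        rw [PySem.List.mem_pyRange_one] at hi
        simp [pv_getD_replicate _ _ _ hi.1 (by exact_mod_cast hi.2)]
      · rw [if_neg h2, pv_foldl_map]
        refine congrArg some ?_
        unfold pvStretch
        rw [if_neg (by omega), if_pos rfl, if_neg (fun hh => h2 hh.symm)]
        rw [pv_zip3_eq_range _ _ _ time_slots.length (by simp) rfl (by simp)]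
        refine List.map_congr_left ?_
        intro i hi
        rw [PySem.List.mem_pyRange_one] at hi
        simp [pv_getD_replicate _ _ _ hi.1 (by exact_mod_cast hi.2)]
    · -- equal lengths
      have hn : max days.length time_slots.length = days.length := by omega
      rw [if_pos h, hn]
      by_cases h2 : days.length = location.length
      · rw [if_pos h2, pv_foldl_map]
        refine congrArg some ?_
        unfold pvStretch
        rw [if_pos rfl, if_pos h.symm, if_pos h2.symm]
        rw [pv_zip3_eq_range _ _ _ days.length rfl h.symm h2.symm]
      · rw [if_neg h2, pv_foldl_map]
        refine congrArg some ?_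
        unfold pvStretch
        rw [if_pos rfl, if_pos h.symm, if_neg (fun hh => h2 hh.symm)]
        rw [pv_zip3_eq_range _ _ _ days.length rfl h.symm (by simp)]
        refine List.map_congr_left ?_
        intro i hi
        rw [PySem.List.mem_pyRange_one] at hi
        simp [pv_getD_replicate _ _ _ hi.1 (by exact_mod_cast hi.2)]
    · -- days > time_slots
      have hn : max days.length time_slots.length = days.length := by omega
      rw [if_neg (by omega), if_pos h, hn]
      by_cases h2 : days.length = location.length
      · rw [if_pos h2, pv_foldl_map]
        refine congrArg some ?_
        unfold pvStretch
        rw [if_pos rfl, if_neg (by omega), if_pos h2.symm]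
        rw [pv_zip3_eq_range _ _ _ days.length rfl (by simp) h2.symm]
        refine List.map_congr_left ?_
        intro i hi
        rw [PySem.List.mem_pyRange_one] at hi
        simp [pv_getD_replicate _ _ _ hi.1 (by exact_mod_cast hi.2)]
      · rw [if_neg h2, pv_foldl_map]
        refine congrArg some ?_
        unfold pvStretch
        rw [if_pos rfl, if_neg (by omega), if_neg (fun hh => h2 hh.symm)]
        rw [pv_zip3_eq_range _ _ _ days.length rfl (by simp) (by simp)]
        refine List.map_congr_left ?_
        intro i hi
        rw [PySem.List.mem_pyRange_one] at hi
        simp [pv_getD_replicate _ _ _ hi.1 (by exact_mod_cast hi.2)]
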